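-- pv_equiv track=rewrite | github.com/qianqians/abelkhan_rpc | hub_call_client/gen/js/gencaller.py | gencaller
-- ===== SOURCE A (Python) =====
-- def gencaller(module_name, funcs):
--         code = "/*this ntf file is codegen by ablekhan for js*/\n\n"
--
--         code += "function " + module_name + "(hub_ptr){\n"
--         code += "    this.get_client = function(uuid){\n"
--         code += "        return new " + module_name + "_cliproxy(uuid, hub_ptr);\n"
--         code += "    }\n"
--         code += "    this.get_multicast = function(uuids){\n"
--         code += "        return new " + module_name + "_cliproxy_multi(uuids, hub_ptr);\n"
--         code += "    }\n"
--         code += "    this.get_broadcast = function(){\n"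
--         code += "        return new " + module_name + "_broadcast(hub_ptr);\n"
--         code += "    }\n"
--         code += "}\n\n"
--
--         cp_code = "function " + module_name + "_cliproxy(uuid, hub_ptr){\n"
--         cp_code += "     this.uuid = uuid;\n\n"
--
--         cm_code = "function " + module_name + "_cliproxy_multi(uuids, hub_ptr){\n"
--         cm_code += "    this.uuids = uuids;\n"
--
--         cb_code = "function " + module_name + "_broadcast(hub_ptr){\n"
--
--         for i in funcs:
--                 func_name = i[0]
--
--                 if i[1] != "ntf" and i[1] != "multicast" and i[1] != "broadcast":
--                         raise "func:" + func_name + " wrong rpc type:" + i[1] + ", must ntf or broadcast"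
--
--                 argvs = ""
--                 count = 0
--                 for item in i[2]:
--                         argvs += "argv" + str(count)
--                         count = count + 1
--                         if count < len(i[2]):
--                                 argvs += ", "
--
--                 tmp_code = "    this." + func_name + " = function("
--                 tmp_code += argvs
--                 tmp_code += "){\n"
--
--                 if i[1] == "ntf":
--                         cp_code += tmp_code
--                         cp_code += "        hub_ptr.gates.call_client(uuid, \"" + module_name + "\", \"" + func_name + "\", " + argvs + ");\n"
--                         cp_code += "    }\n"
--                 elif i[1] == "multicast":
--                         cm_code += tmp_code
--                         cm_code += "        hub_ptr.gates.call_group_client(uuids, \"" + module_name + "\", \"" + func_name + "\", " + argvs + ");\n"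
--                         cm_code += "    }\n"
--                 elif i[1] == "broadcast":
--                         cb_code += tmp_code
--                         cb_code += "        hub_ptr.gates.call_global_client(\"" + module_name + "\", \"" + func_name + "\", " + argvs + ");\n"
--                         cb_code += "    }\n"
--
--         cp_code += "}\n\n"
--         cm_code += "}\n\n"
--         cb_code += "}\n\n"
--
--         return code + cp_code + cm_code + cb_code
-- ===== SOURCE B (Python) =====
-- def gencaller(module_name, funcs):
--     for f in funcs:
--         if f[1] != "ntf" and f[1] != "multicast" and f[1] != "broadcast":
--             raise TypeError("func:" + f[0] + " wrong rpc type:" + f[1] + ", must ntf or broadcast")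
--
--     def method(name, params, call_prefix):
--         argvs = ", ".join("argv" + str(k) for k in range(len(params)))
--         return ("    this." + name + " = function(" + argvs + "){\n"
--                 + "        " + call_prefix + "\"" + module_name + "\", \"" + name + "\", " + argvs + ");\n"
--                 + "    }\n")
--
--     ntf = "".join(method(f[0], f[2], "hub_ptr.gates.call_client(uuid, ")
--                   for f in funcs if f[1] == "ntf")
--     multi = "".join(method(f[0], f[2], "hub_ptr.gates.call_group_client(uuids, ")
--                     for f in funcs if f[1] == "multicast")
--     broad = "".join(method(f[0], f[2], "hub_ptr.gates.call_global_client(")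
--                     for f in funcs if f[1] == "broadcast")
--
--     return ("/*this ntf file is codegen by ablekhan for js*/\n\n"
--             + "function " + module_name + "(hub_ptr){\n"
--             + "    this.get_client = function(uuid){\n"
--             + "        return new " + module_name + "_cliproxy(uuid, hub_ptr);\n"
--             + "    }\n"
--             + "    this.get_multicast = function(uuids){\n"
--             + "        return new " + module_name + "_cliproxy_multi(uuids, hub_ptr);\n"
--             + "    }\n"
--             + "    this.get_broadcast = function(){\n"
--             + "        return new " + module_name + "_broadcast(hub_ptr);\n"
--             + "    }\n"
--             + "}\n\n"
--             + "function " + module_name + "_cliproxy(uuid, hub_ptr){\n"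
--             + "     this.uuid = uuid;\n\n"
--             + ntf + "}\n\n"
--             + "function " + module_name + "_cliproxy_multi(uuids, hub_ptr){\n"
--             + "    this.uuids = uuids;\n"
--             + multi + "}\n\n"
--             + "function " + module_name + "_broadcast(hub_ptr){\n"
--             + broad + "}\n\n")
-- ===== Notes on version B (the rewrite author's own statement) =====
-- stated objective: simpler
-- what changed: Replaces the single interleaved loop that appends into three growing accumulator strings (and a counted inner loop building argvs) with a validate pass followed by three independent filter-and-join renderings, argvs coming from ', '.join over range(len(params)).
import Mathlib
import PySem

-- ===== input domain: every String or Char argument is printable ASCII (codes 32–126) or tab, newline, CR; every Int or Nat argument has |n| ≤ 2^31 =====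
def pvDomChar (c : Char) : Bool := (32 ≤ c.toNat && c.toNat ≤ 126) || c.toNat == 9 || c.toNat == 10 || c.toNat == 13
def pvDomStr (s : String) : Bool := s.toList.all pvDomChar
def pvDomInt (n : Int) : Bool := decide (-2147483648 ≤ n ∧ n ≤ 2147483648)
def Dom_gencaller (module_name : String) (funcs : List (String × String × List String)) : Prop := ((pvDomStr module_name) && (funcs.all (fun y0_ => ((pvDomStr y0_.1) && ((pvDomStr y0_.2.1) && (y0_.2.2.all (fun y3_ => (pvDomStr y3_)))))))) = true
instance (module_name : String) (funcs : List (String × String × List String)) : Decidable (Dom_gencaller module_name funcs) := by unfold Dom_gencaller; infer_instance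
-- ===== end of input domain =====

-- B replaces A's single interleaved accumulation loop by validate-then-partition rendering (three filter+join passes); return value only, no mutation.


-- ===== PORT A =====
-- inner argv loop of A: for item in i[2]: argvs += "argv"+str(count); count += 1; if count < len(i[2]): argvs += ", "
def pvArgStep (n : Int) (st : String × Int) (_item : String) : String × Int :=
  let argvs := st.1 ++ "argv" ++ PySem.Int.toStr st.2
  let count := st.2 + 1
  (if count < n then argvs ++ ", " else argvs, count)

def pvArgvsA (params : List String) : String :=
  (params.foldl (pvArgStep (params.length : Int)) ("", 0)).1

-- A's main loop over funcs, threading the three accumulators; none = the raise (TypeError: string exception)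
def pvLoopA (module_name : String) : List (String × String × List String) → String → String → String → Option (String × String × String)
  | [], cp_code, cm_code, cb_code => some (cp_code, cm_code, cb_code)
  | i :: rest, cp_code, cm_code, cb_code =>
    let func_name := i.1
    if i.2.1 ≠ "ntf" ∧ i.2.1 ≠ "multicast" ∧ i.2.1 ≠ "broadcast" then none
    else
      let argvs := pvArgvsA i.2.2
      let tmp_code := "    this." ++ func_name ++ " = function(" ++ argvs ++ "){\n"
      if i.2.1 = "ntf" then
        pvLoopA module_name rest
          (cp_code ++ tmp_code ++ ("        hub_ptr.gates.call_client(uuid, \"" ++ module_name ++ "\", \"" ++ func_name ++ "\", " ++ argvs ++ ");\n") ++ "    }\n")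
          cm_code cb_code
      else if i.2.1 = "multicast" then
        pvLoopA module_name rest cp_code
          (cm_code ++ tmp_code ++ ("        hub_ptr.gates.call_group_client(uuids, \"" ++ module_name ++ "\", \"" ++ func_name ++ "\", " ++ argvs ++ ");\n") ++ "    }\n")
          cb_code
      else
        pvLoopA module_name rest cp_code cm_code
          (cb_code ++ tmp_code ++ ("        hub_ptr.gates.call_global_client(\"" ++ module_name ++ "\", \"" ++ func_name ++ "\", " ++ argvs ++ ");\n") ++ "    }\n")

def gencaller (module_name : String) (funcs : List (String × String × List String)) : String :=
  let code := "/*this ntf file is codegen by ablekhan for js*/\n\n"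
    ++ ("function " ++ module_name ++ "(hub_ptr){\n")
    ++ "    this.get_client = function(uuid){\n"
    ++ ("        return new " ++ module_name ++ "_cliproxy(uuid, hub_ptr);\n")
    ++ "    }\n"
    ++ "    this.get_multicast = function(uuids){\n"
    ++ ("        return new " ++ module_name ++ "_cliproxy_multi(uuids, hub_ptr);\n")
    ++ "    }\n"
    ++ "    this.get_broadcast = function(){\n"
    ++ ("        return new " ++ module_name ++ "_broadcast(hub_ptr);\n")
    ++ "    }\n"
    ++ "}\n\n"
  let cp0 := ("function " ++ module_name ++ "_cliproxy(uuid, hub_ptr){\n") ++ "     this.uuid = uuid;\n\n"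
  let cm0 := ("function " ++ module_name ++ "_cliproxy_multi(uuids, hub_ptr){\n") ++ "    this.uuids = uuids;\n"
  let cb0 := "function " ++ module_name ++ "_broadcast(hub_ptr){\n"
  match pvLoopA module_name funcs cp0 cm0 cb0 with
  | none => ""   -- here the Python raises (string raise → TypeError); excluded by Pre_gencaller
  | some (cp_code, cm_code, cb_code) =>
      code ++ (cp_code ++ "}\n\n") ++ (cm_code ++ "}\n\n") ++ (cb_code ++ "}\n\n")

-- ===== PORT B =====
def pvMethod (module_name name : String) (params : List String) (call_prefix : String) : String :=
  let argvs := PySem.Str.join ", " ((PySem.List.pyRange 0 (params.length : Int) 1).map (fun k => "argv" ++ PySem.Int.toStr k))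
  ("    this." ++ name ++ " = function(" ++ argvs ++ "){\n")
  ++ ("        " ++ call_prefix ++ "\"" ++ module_name ++ "\", \"" ++ name ++ "\", " ++ argvs ++ ");\n")
  ++ "    }\n"

def gencaller_alt (module_name : String) (funcs : List (String × String × List String)) : String :=
  if funcs.all (fun f => f.2.1 == "ntf" || f.2.1 == "multicast" || f.2.1 == "broadcast") then
    let ntf := PySem.Str.join "" ((funcs.filter (fun f => f.2.1 == "ntf")).map
      (fun f => pvMethod module_name f.1 f.2.2 "hub_ptr.gates.call_client(uuid, "))
    let multi := PySem.Str.join "" ((funcs.filter (fun f => f.2.1 == "multicast")).map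
      (fun f => pvMethod module_name f.1 f.2.2 "hub_ptr.gates.call_group_client(uuids, "))
    let broad := PySem.Str.join "" ((funcs.filter (fun f => f.2.1 == "broadcast")).map
      (fun f => pvMethod module_name f.1 f.2.2 "hub_ptr.gates.call_global_client("))
    "/*this ntf file is codegen by ablekhan for js*/\n\n"
    ++ ("function " ++ module_name ++ "(hub_ptr){\n")
    ++ "    this.get_client = function(uuid){\n"
    ++ ("        return new " ++ module_name ++ "_cliproxy(uuid, hub_ptr);\n")
    ++ "    }\n"
    ++ "    this.get_multicast = function(uuids){\n"
    ++ ("        return new " ++ module_name ++ "_cliproxy_multi(uuids, hub_ptr);\n")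
    ++ "    }\n"
    ++ "    this.get_broadcast = function(){\n"
    ++ ("        return new " ++ module_name ++ "_broadcast(hub_ptr);\n")
    ++ "    }\n"
    ++ "}\n\n"
    ++ ("function " ++ module_name ++ "_cliproxy(uuid, hub_ptr){\n")
    ++ "     this.uuid = uuid;\n\n"
    ++ ntf ++ "}\n\n"
    ++ ("function " ++ module_name ++ "_cliproxy_multi(uuids, hub_ptr){\n")
    ++ "    this.uuids = uuids;\n"
    ++ multi ++ "}\n\n"
    ++ ("function " ++ module_name ++ "_broadcast(hub_ptr){\n")
    ++ broad ++ "}\n\n"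
  else ""   -- here the Python B raises TypeError; excluded by Pre_gencaller

-- ===== PRECONDITION & SPEC =====
-- Pre_ excludes exactly the inputs containing a func whose rpc type is not ntf/multicast/broadcast: there A raises
-- (its string raise is a TypeError) and B raises TypeError too, so neither returns.
def Pre_gencaller (module_name : String) (funcs : List (String × String × List String)) : Prop :=
  (funcs.all (fun f => f.2.1 == "ntf" || f.2.1 == "multicast" || f.2.1 == "broadcast")) = true
instance (module_name : String) (funcs : List (String × String × List String)) : Decidable (Pre_gencaller module_name funcs) := by unfold Pre_gencaller; infer_instance

def pvWitness_gencaller : String × (List (String × String × List String)) :=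
  ("mod", [("f", "ntf", ["a", "b"]), ("g", "multicast", []), ("h", "broadcast", ["x"])])

def Spec_gencaller (module_name : String) (funcs : List (String × String × List String)) (out : String) : Prop := out = gencaller_alt module_name funcs
instance (module_name : String) (funcs : List (String × String × List String)) (out : String) : Decidable (Spec_gencaller module_name funcs out) := by unfold Spec_gencaller; infer_instance

-- ===== CLAIM (what is proved, stated in full; the proofs are below) =====
def Claim_equal_gencaller : Prop := ∀ (module_name : String) (funcs : List (String × String × List String)), Dom_gencaller module_name funcs → Pre_gencaller module_name funcs → Spec_gencaller module_name funcs (gencaller module_name funcs)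

-- ===== LEMMAS AND PROOFS =====

-- Str-level liftings of the Chars join lemmas
theorem pv_sjoin_nil (sep : String) : PySem.Str.join sep [] = "" := by
  simp [PySem.Str.join]

theorem pv_sjoin_singleton (sep p : String) : PySem.Str.join sep [p] = p := by
  simp [PySem.Str.join, PySem.Chars.join_singleton]

theorem pv_sjoin_cons_cons (sep p q : String) (r : List String) :
    PySem.Str.join sep (p :: q :: r) = p ++ sep ++ PySem.Str.join sep (q :: r) := by
  simp [PySem.Str.join, PySem.Chars.join_cons_cons, String.append_assoc]

theorem pv_sjoin_empty_cons (p : String) (r : List String) :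
    PySem.Str.join "" (p :: r) = p ++ PySem.Str.join "" r := by
  cases r with
  | nil => simp [PySem.Str.join, PySem.Chars.join_singleton]
  | cons q t => simp [PySem.Str.join, PySem.Chars.join_cons_cons]

-- the argv string "argv c, argv (c+1), …" of m items, comparisons against n
def pvJ (n : Int) : Int → Nat → String
  | _, 0 => ""
  | c, m+1 => "argv" ++ PySem.Int.toStr c ++ ((if c + 1 < n then ", " else "") ++ pvJ n (c+1) m)

theorem pv_foldA (n : Int) (l : List String) : ∀ (s : String) (c : Int),
    l.foldl (pvArgStep n) (s, c) = (s ++ pvJ n c l.length, c + l.length) := by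
  induction l with
  | nil => intro s c; simp [pvJ.eq_def]
  | cons a t ih =>
    intro s c
    simp only [List.foldl_cons, pvArgStep]
    rw [ih]
    simp only [pvJ, List.length_cons, Prod.mk.injEq]
    refine ⟨?_, by push_cast; ring⟩
    split_ifs with h <;> simp [String.append_assoc]

theorem pv_joinB (m : Nat) : ∀ (c : Int),
    PySem.Str.join ", " ((PySem.List.pyRange c (c + m) 1).map (fun k => "argv" ++ PySem.Int.toStr k))
      = pvJ (c + m) c m := by
  induction m with
  | zero =>
    intro c
    rw [PySem.List.pyRange_one_eq_nil (by omega)]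
    simp [pvJ, pv_sjoin_nil]
  | succ m ih =>
    intro c
    cases m with
    | zero =>
      have h1 : c + ((0+1 : Nat) : Int) = c + 1 := by push_cast; ring
      rw [h1, PySem.List.pyRange_one_cons (by omega : c < c + 1),
          PySem.List.pyRange_one_eq_nil (by omega : c + 1 ≤ c + 1)]
      simp only [List.map_cons, List.map_nil]
      rw [pv_sjoin_singleton]
      simp only [pvJ]
      rw [if_neg (by omega : ¬ c + 1 < c + 1)]
      simp
    | succ m' =>
      have hc : c + ((m'+1+1 : Nat) : Int) = (c+1) + ((m'+1 : Nat) : Int) := by push_cast; ring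
      have h2 : c + 1 < (c+1) + ((m'+1 : Nat) : Int) := by push_cast; omega
      rw [hc, PySem.List.pyRange_one_cons (by push_cast; omega : c < (c+1) + ((m'+1 : Nat) : Int))]
      have ih' := ih (c+1)
      rw [PySem.List.pyRange_one_cons h2] at ih' ⊢
      simp only [List.map_cons] at ih' ⊢
      rw [pv_sjoin_cons_cons, ih']
      simp only [pvJ]
      rw [if_pos (by push_cast; omega : c + 1 < (c+1) + ((m'+1 : Nat) : Int))]
      simp [String.append_assoc]

theorem pv_argvs_eq (params : List String) :
    pvArgvsA params
      = PySem.Str.join ", " ((PySem.List.pyRange 0 (params.length : Int) 1).map (fun k => "argv" ++ PySem.Int.toStr k)) := by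
  unfold pvArgvsA
  rw [pv_foldA]
  have := pv_joinB params.length 0
  rw [zero_add] at this
  rw [this]
  simp

-- one rendered section of B
def pvSec (module_name call_prefix t : String) (funcs : List (String × String × List String)) : String :=
  PySem.Str.join "" ((funcs.filter (fun f => f.2.1 == t)).map
    (fun f => pvMethod module_name f.1 f.2.2 call_prefix))

theorem pv_loopA_eq (M : String) (funcs : List (String × String × List String))
    (hv : (funcs.all (fun f => f.2.1 == "ntf" || f.2.1 == "multicast" || f.2.1 == "broadcast")) = true) :
    ∀ (cp cm cb : String),
    pvLoopA M funcs cp cm cb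
      = some (cp ++ pvSec M "hub_ptr.gates.call_client(uuid, " "ntf" funcs,
              cm ++ pvSec M "hub_ptr.gates.call_group_client(uuids, " "multicast" funcs,
              cb ++ pvSec M "hub_ptr.gates.call_global_client(" "broadcast" funcs) := by
  induction funcs with
  | nil => intro cp cm cb; simp [pvLoopA, pvSec, pv_sjoin_nil]
  | cons f rest ih =>
    simp only [List.all_cons, Bool.and_eq_true] at hv
    obtain ⟨hf, hrest⟩ := hv
    intro cp cm cb
    simp only [Bool.or_eq_true, beq_iff_eq] at hf
    cases hf with
    | inl hf' => cases hf' with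
      | inl h => -- ntf
      rw [pvLoopA, h, if_neg (by decide), if_pos rfl, ih hrest]
      unfold pvSec
      rw [List.filter_cons_of_pos (by simp [h]),
          List.filter_cons_of_neg (by simp [h]),
          List.filter_cons_of_neg (by simp [h])]
      simp only [List.map_cons]
      rw [pv_sjoin_empty_cons]
      simp [pvMethod, pv_argvs_eq, String.append_assoc]
      | inr h => -- multicast
      rw [pvLoopA, h, if_neg (by decide), if_neg (by decide), if_pos rfl, ih hrest]
      unfold pvSec
      rw [List.filter_cons_of_neg (by simp [h]),
          List.filter_cons_of_pos (by simp [h]),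
          List.filter_cons_of_neg (by simp [h])]
      simp only [List.map_cons]
      rw [pv_sjoin_empty_cons]
      simp [pvMethod, pv_argvs_eq, String.append_assoc]
    | inr h => -- broadcast
      rw [pvLoopA, h, if_neg (by decide), if_neg (by decide), if_neg (by decide), ih hrest]
      unfold pvSec
      rw [List.filter_cons_of_neg (by simp [h]),
          List.filter_cons_of_neg (by simp [h]),
          List.filter_cons_of_pos (by simp [h])]
      simp only [List.map_cons]
      rw [pv_sjoin_empty_cons]
      simp [pvMethod, pv_argvs_eq, String.append_assoc]

-- ===== VERDICT (by name: the statement is the Claim_ definition above) =====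
theorem gencaller_spec : Claim_equal_gencaller := by
  intro M funcs _hdom hpre
  unfold Pre_gencaller at hpre
  simp only [Spec_gencaller, gencaller, gencaller_alt]
  rw [if_pos hpre, pv_loopA_eq M funcs hpre]
  simp only [pvSec]
  simp [String.append_assoc]
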